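-- pv_equiv track=rewrite | github.com/witNie/alg_geo | lab4/event_getter_v2.py | event_getter
-- ===== SOURCE A (Python) =====
-- def binsearch(lst, el):
--     n = len(lst)
--
--     # If the new element is larger than the last element, return n
--     if n == 0 or el[0] > lst[-1][0]:
--         return n
--
--     l, r = 0, n - 1
--     while l <= r:
--         mid = (l + r) // 2
--         if lst[mid][0] < el[0]:
--             l = mid + 1
--         else:
--             r = mid - 1
--
--     return l
--
-- def event_getter(section):
--     events = []
--     n = len(section)
--     for s in range(n):
--
--         x, y = section[s][0]
--         if (x, y, "s") not in events:
--             ind = binsearch(events, (x, y, "s", s))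
--             if ind == len(events):
--                 events.append((x, y, "s", s))
--             else:
--                 events.insert(ind, (x, y, "s", s))
--
--         x, y = section[s][1]
--         if (x, y, "t", s) not in events:
--             ind = binsearch(events, (x, y, "t", s))
--             if ind == len(events):
--                 events.append((x, y, "t", s))
--             else:
--                 events.insert(ind, (x, y, "t", s))
--
--
--
--     return events
-- ===== SOURCE B (Python) =====
-- def event_getter(section):
--     events = []
--     for s, (p, q) in enumerate(section):
--         events.append((p[0], p[1], "s", s))
--         events.append((q[0], q[1], "t", s))
--     events.reverse()
--     events.sort(key=lambda e: e[0])
--     return events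
-- ===== Notes on version B (the rewrite author's own statement) =====
-- stated objective: faster
-- what changed: Instead of maintaining a sorted list with a binary search plus O(n) list.insert (and O(n) membership checks that never fire, since one compares a 3-tuple to 4-tuples and the other tests a per-segment-unique tuple), B collects all 2n events in one pass, reverses, and does one stable sort by x, which reproduces A's before-equal-keys insertion order.
import Mathlib
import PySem

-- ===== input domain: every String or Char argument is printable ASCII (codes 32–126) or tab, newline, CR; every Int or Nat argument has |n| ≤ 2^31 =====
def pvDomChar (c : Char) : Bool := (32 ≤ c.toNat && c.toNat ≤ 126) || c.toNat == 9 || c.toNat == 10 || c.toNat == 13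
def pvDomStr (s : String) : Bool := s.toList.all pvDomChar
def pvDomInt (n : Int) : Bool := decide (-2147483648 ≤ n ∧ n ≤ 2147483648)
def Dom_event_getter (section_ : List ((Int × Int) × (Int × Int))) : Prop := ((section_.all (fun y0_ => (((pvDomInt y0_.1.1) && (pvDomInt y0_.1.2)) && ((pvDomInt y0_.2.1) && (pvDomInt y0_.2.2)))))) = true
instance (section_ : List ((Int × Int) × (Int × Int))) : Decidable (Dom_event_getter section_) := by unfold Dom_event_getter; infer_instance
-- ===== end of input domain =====

-- B replaces A's per-element binary-search-and-insert (quadratic: list.insert and the membership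
-- tests are O(n)) by one pass collecting the 2n events, a reverse, and one stable sort by x.

-- ===== PORT A =====

-- default element for pyGetD: every index used below is in range
def pvDefEv : Int × Int × String × Int := (0, 0, "", 0)
def pvDefSeg : (Int × Int) × (Int × Int) := ((0, 0), (0, 0))

-- 'while l <= r: mid = (l + r) // 2; …' — lst[mid] is always in range when called from binsearch
def binsearchLoop (lst : List (Int × Int × String × Int)) (el : Int × Int × String × Int)
    (l r : Int) : Int :=
  if h : l ≤ r then
    let mid := PySem.Int.floordiv (l + r) 2
    if (PySem.List.pyGetD lst mid pvDefEv).1 < el.1 then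
      binsearchLoop lst el (mid + 1) r
    else
      binsearchLoop lst el l (mid - 1)
  else l
termination_by (r + 1 - l).toNat
decreasing_by
  · have := PySem.Int.floordiv_two_mid_bounds h; omega
  · have := PySem.Int.floordiv_two_mid_bounds h; omega

def binsearch (lst : List (Int × Int × String × Int)) (el : Int × Int × String × Int) : Int :=
  let n : Int := PySem.List.len lst
  -- 'if n == 0 or el[0] > lst[-1][0]: return n'  (short-circuit: lst[-1] only read when n ≠ 0)
  if n = 0 then n
  else if (PySem.List.pyGetD lst (-1) pvDefEv).1 < el.1 then n
  else binsearchLoop lst el 0 (n - 1)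

-- Python's '(x, y, "s") not in events' compares a 3-tuple with the 4-tuples stored in events;
-- tuples of different arity are never equal in Python, so each comparison is False (exact port).
def pvNotInArity3 (events : List (Int × Int × String × Int)) : Bool :=
  !(events.any (fun _ => false))

-- 'ind = binsearch(events, el); if ind == len(events): events.append(el) else: events.insert(ind, el)'
def pvInsertEvent (events : List (Int × Int × String × Int)) (el : Int × Int × String × Int) :
    List (Int × Int × String × Int) :=
  let ind := binsearch events el
  if ind = PySem.List.len events then events ++ [el]
  else PySem.List.insert events ind el

-- one iteration of A's 'for s in range(n)' body, sec = section[s]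
def pvStepA (events : List (Int × Int × String × Int)) (s : Int)
    (sec : (Int × Int) × (Int × Int)) : List (Int × Int × String × Int) :=
  let x1 := sec.1.1; let y1 := sec.1.2
  let events := if pvNotInArity3 events then pvInsertEvent events (x1, y1, "s", s) else events
  let x2 := sec.2.1; let y2 := sec.2.2
  if !(events.contains (x2, y2, "t", s)) then pvInsertEvent events (x2, y2, "t", s) else events

def event_getter (section_ : List ((Int × Int) × (Int × Int))) : List (Int × Int × String × Int) :=
  let n : Int := PySem.List.len section_
  (PySem.List.pyRange 0 n 1).foldl
    (fun events s => pvStepA events s (PySem.List.pyGetD section_ s pvDefSeg)) []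

-- ===== PORT B =====
def event_getter_alt (section_ : List ((Int × Int) × (Int × Int))) : List (Int × Int × String × Int) :=
  let events := (PySem.List.enumerate section_ 0).foldl
    (fun events spq =>
      let s := spq.1; let p := spq.2.1; let q := spq.2.2
      let events := events ++ [(p.1, p.2, "s", s)]
      events ++ [(q.1, q.2, "t", s)]) []
  let events := events.reverse
  PySem.List.sorted events (fun e => e.1) false

-- ===== PRECONDITION & SPEC =====
def Spec_event_getter (section_ : List ((Int × Int) × (Int × Int))) (out : List (Int × Int × String × Int)) : Prop := out = event_getter_alt section_
instance (section_ : List ((Int × Int) × (Int × Int))) (out : List (Int × Int × String × Int)) : Decidable (Spec_event_getter section_ out) := by unfold Spec_event_getter; infer_instance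

-- ===== CLAIM (what is proved, stated in full; the proofs are below) =====
def Claim_equal_event_getter : Prop := ∀ (section_ : List ((Int × Int) × (Int × Int))), Dom_event_getter section_ → Spec_event_getter section_ (event_getter section_)

-- ===== LEMMAS AND PROOFS =====

-- insertion before the first element of x-key >= el's (what A's bisect-left insert does)
def insLeft (el : Int × Int × String × Int) :
    List (Int × Int × String × Int) → List (Int × Int × String × Int)
  | [] => [el]
  | y :: ys => if y.1 < el.1 then y :: insLeft el ys else el :: y :: ys

-- insertion after the last element of x-key <= el's (one step of PySem's stable insertion sort)
def insAfter (el : Int × Int × String × Int) (L : List (Int × Int × String × Int)) :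
    List (Int × Int × String × Int) :=
  PySem.List.insertBy (fun a b => decide (a.1 < b.1)) el L

def pvSortedX (L : List (Int × Int × String × Int)) : Prop :=
  L.Pairwise (fun a b => a.1 ≤ b.1)

-- the two event tuples of segment number s
def pvEvents2 (spq : Int × ((Int × Int) × (Int × Int))) : List (Int × Int × String × Int) :=
  [(spq.2.1.1, spq.2.1.2, "s", spq.1), (spq.2.2.1, spq.2.2.2, "t", spq.1)]

lemma insLeft_eq (el : Int × Int × String × Int) (L : List (Int × Int × String × Int)) :
    insLeft el L = L.takeWhile (fun e => e.1 < el.1) ++ el :: L.dropWhile (fun e => e.1 < el.1) := by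
  induction L with
  | nil => simp [insLeft]
  | cons y ys ih =>
    by_cases h : y.1 < el.1 <;> simp [insLeft, h, ih]

lemma insLeft_perm (el : Int × Int × String × Int) (L : List (Int × Int × String × Int)) :
    (insLeft el L).Perm (el :: L) := by
  induction L with
  | nil => simp [insLeft]
  | cons y ys ih =>
    by_cases h : y.1 < el.1
    · simp only [insLeft, if_pos h]
      exact ((ih.cons y).trans (List.Perm.swap el y ys))
    · simp [insLeft, h]

lemma insLeft_sorted (el : Int × Int × String × Int) (L : List (Int × Int × String × Int))
    (h : pvSortedX L) : pvSortedX (insLeft el L) := by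
  induction L with
  | nil => simp [insLeft, pvSortedX]
  | cons y ys ih =>
    rcases (List.pairwise_cons.mp h) with ⟨hy, hys⟩
    by_cases hc : y.1 < el.1
    · simp only [insLeft, if_pos hc]
      refine List.pairwise_cons.mpr ⟨?_, ih hys⟩
      intro b hb
      rcases List.mem_cons.mp ((insLeft_perm el ys).mem_iff.mp hb) with h1 | h2
      · subst h1; omega
      · exact hy b h2
    · simp only [insLeft, if_neg hc]
      refine List.pairwise_cons.mpr ⟨?_, h⟩
      intro b hb
      rcases List.mem_cons.mp hb with h1 | h2
      · subst h1; omega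
      · have := hy b h2; omega

lemma insAfter_nil (el : Int × Int × String × Int) : insAfter el [] = [el] := rfl

lemma insAfter_cons (el z : Int × Int × String × Int) (zs : List (Int × Int × String × Int)) :
    insAfter el (z :: zs) = if el.1 < z.1 then el :: z :: zs else z :: insAfter el zs := by
  simp [insAfter, PySem.List.insertBy]

lemma insLeft_insAfter_comm (x y : Int × Int × String × Int)
    (L : List (Int × Int × String × Int)) :
    insLeft x (insAfter y L) = insAfter y (insLeft x L) := by
  induction L with
  | nil =>
    show insLeft x [y] = insAfter y [x]
    rw [insAfter_cons]
    by_cases h : y.1 < x.1 <;> simp [insLeft, h, insAfter_nil]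
  | cons z zs ih =>
    by_cases h1 : y.1 < z.1
    · rw [insAfter_cons, if_pos h1]
      by_cases h2 : y.1 < x.1
      · simp only [insLeft, if_pos h2]
        by_cases h3 : z.1 < x.1
        · rw [if_pos h3, insAfter_cons, if_pos h1]
        · rw [if_neg h3, insAfter_cons, if_pos h2]
      · have h3 : ¬ z.1 < x.1 := by omega
        rw [show insLeft x (y :: z :: zs) = x :: y :: z :: zs from by simp [insLeft]; omega,
          show insLeft x (z :: zs) = x :: z :: zs from by simp [insLeft, h3],
          insAfter_cons, if_neg (by omega), insAfter_cons, if_pos h1]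
    · rw [insAfter_cons, if_neg h1]
      by_cases h3 : z.1 < x.1
      · rw [show insLeft x (z :: insAfter y zs) = z :: insLeft x (insAfter y zs) from by
            simp [insLeft, h3],
          show insLeft x (z :: zs) = z :: insLeft x zs from by simp [insLeft, h3],
          insAfter_cons, if_neg h1, ih]
      · rw [show insLeft x (z :: insAfter y zs) = x :: z :: insAfter y zs from by
            simp [insLeft, h3],
          show insLeft x (z :: zs) = x :: z :: zs from by simp [insLeft, h3],
          insAfter_cons, if_neg (by omega), insAfter_cons, if_neg h1]

lemma foldl_insLeft_insAfter (t : List (Int × Int × String × Int))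
    (el : Int × Int × String × Int) (M : List (Int × Int × String × Int)) :
    t.foldl (fun a e => insLeft e a) (insAfter el M)
      = insAfter el (t.foldl (fun a e => insLeft e a) M) := by
  induction t generalizing M with
  | nil => rfl
  | cons z t ih => simp only [List.foldl_cons, insLeft_insAfter_comm, ih]

lemma foldl_insLeft_eq_foldr (seq : List (Int × Int × String × Int)) :
    seq.foldl (fun a e => insLeft e a) [] = seq.foldr insAfter [] := by
  induction seq with
  | nil => rfl
  | cons el t ih =>
    have : insLeft el [] = insAfter el [] := rfl
    simp only [List.foldl_cons, List.foldr_cons, this, foldl_insLeft_insAfter, ih]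

lemma splitpoint_iff (L : List (Int × Int × String × Int)) (el : Int × Int × String × Int)
    (h : pvSortedX L) (j : Nat) (hj : j < L.length) :
    (L[j].1 < el.1 ↔ j < (L.takeWhile (fun e => e.1 < el.1)).length) := by
  set p : (Int × Int × String × Int) → Bool := fun e => decide (e.1 < el.1) with hp
  set c := (L.takeWhile p).length with hc
  have hsplit : L.takeWhile p ++ L.dropWhile p = L := List.takeWhile_append_dropWhile
  have hcle : c ≤ L.length := by
    have := congrArg List.length hsplit
    simp only [List.length_append] at this
    omega
  constructor
  · intro hlt
    by_contra hge
    push Not at hge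
    -- ¬ p (L[c]) since L[c] is the head of dropWhile
    have hclen : c < L.length := by omega
    have hdrop_ne : L.dropWhile p ≠ [] := by
      intro hnil
      have := congrArg List.length hsplit
      simp [hnil] at this
      omega
    have hhead : (L.dropWhile p).head hdrop_ne = L[c] := by
      have : L[c] = (L.takeWhile p ++ L.dropWhile p)[c]'(by rw [hsplit]; omega) := by
        congr 1; rw [hsplit]
      rw [this, List.getElem_append_right (by omega)]
      simp [hc, List.head_eq_getElem]
    have hnp : p ((L.dropWhile p).head hdrop_ne) = false := List.head_dropWhile_not p hdrop_ne
    rw [hhead] at hnp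
    have h1 : el.1 ≤ L[c].1 := by simp [hp] at hnp; omega
    have h2 : L[c].1 ≤ L[j].1 := by
      rcases Nat.eq_or_lt_of_le hge with he | hlt2
      · subst he; exact le_refl _
      · exact (List.pairwise_iff_getElem.mp h) c j hclen hj hlt2
    omega
  · intro hlt
    have hmem : (L.takeWhile p)[j]'(by omega) ∈ L.takeWhile p := List.getElem_mem _
    have hpj := List.mem_takeWhile_imp hmem
    have heq : (L.takeWhile p)[j]'(by omega) = L[j] := (List.takeWhile_prefix p).getElem _
    rw [heq] at hpj
    simpa [hp] using hpj

lemma binsearchLoop_eq (L : List (Int × Int × String × Int)) (el : Int × Int × String × Int)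
    (h : pvSortedX L) :
    ∀ (N : Nat) (l r : Int), (r + 1 - l).toNat ≤ N → 0 ≤ l → r < (L.length : Int) →
      l ≤ ((L.takeWhile (fun e => e.1 < el.1)).length : Int) →
      ((L.takeWhile (fun e => e.1 < el.1)).length : Int) ≤ r + 1 →
      binsearchLoop L el l r = ((L.takeWhile (fun e => e.1 < el.1)).length : Int) := by
  set c := (L.takeWhile (fun e => e.1 < el.1)).length with hc
  intro N
  induction N with
  | zero =>
    intro l r hN h0 hr hlc hcr
    rw [binsearchLoop]
    rw [dif_neg (by omega)]
    omega
  | succ N ih =>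
    intro l r hN h0 hr hlc hcr
    rw [binsearchLoop]
    by_cases hlr : l ≤ r
    · rw [dif_pos hlr]
      have hmid := PySem.Int.floordiv_two_mid_bounds hlr
      set mid := PySem.Int.floordiv (l + r) 2 with hm
      show (if (PySem.List.pyGetD L mid pvDefEv).1 < el.1 then binsearchLoop L el (mid + 1) r
        else binsearchLoop L el l (mid - 1)) = (c : Int)
      have hmid0 : 0 ≤ mid := by omega
      have hmidlen : mid < (L.length : Int) := by omega
      have hget : PySem.List.pyGetD L mid pvDefEv = L[mid.toNat]'(by omega) :=
        PySem.List.pyGetD_eq_getElem L pvDefEv hmid0 (by simpa using hmidlen)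
      have hiff := splitpoint_iff L el h mid.toNat (by omega)
      rw [hget]
      by_cases hp : (L[mid.toNat]'(by omega)).1 < el.1
      · rw [if_pos hp]
        have : mid.toNat < c := hiff.mp hp
        exact ih (mid + 1) r (by omega) (by omega) hr (by omega) hcr
      · rw [if_neg hp]
        have : ¬ (mid.toNat < c) := fun hcm => hp (hiff.mpr hcm)
        exact ih l (mid - 1) (by omega) h0 (by omega) hlc (by omega)
    · rw [dif_neg hlr]
      omega

lemma binsearch_eq (L : List (Int × Int × String × Int)) (el : Int × Int × String × Int)
    (h : pvSortedX L) :
    binsearch L el = ((L.takeWhile (fun e => e.1 < el.1)).length : Int) := by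
  set c := (L.takeWhile (fun e => e.1 < el.1)).length with hc
  have hcle : c ≤ L.length := by
    have := congrArg List.length (List.takeWhile_append_dropWhile
      (p := fun e => decide (e.1 < el.1)) (l := L))
    simp only [List.length_append] at this
    omega
  unfold binsearch
  by_cases h0 : (PySem.List.len L : Int) = 0
  · rw [if_pos h0]
    have : L = [] := by
      cases L with
      | nil => rfl
      | cons a t => simp [PySem.List.len] at h0; omega
    subst this
    simp [hc]
  · rw [if_neg h0]
    have hL : L ≠ [] := by
      intro hnil; subst hnil; simp [PySem.List.len] at h0
    have hlen : (PySem.List.len L : Int) = (L.length : Int) := by simp [PySem.List.len]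
    by_cases hlast : (PySem.List.pyGetD L (-1) pvDefEv).1 < el.1
    · rw [if_pos hlast]
      -- all elements have key < el.1, so c = length
      have hgl : PySem.List.pyGetD L (-1) pvDefEv = L.getLast hL :=
        PySem.List.pyGetD_neg_one L pvDefEv hL
      rw [hgl] at hlast
      have hall : ∀ e ∈ L, (fun e => decide (e.1 < el.1)) e = true := by
        intro e he
        rcases List.mem_iff_getElem.mp he with ⟨j, hj, rfl⟩
        have hlast_idx : L.getLast hL = L[L.length - 1]'(by omega) := List.getLast_eq_getElem hL
        have : L[j].1 ≤ (L.getLast hL).1 := by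
          rw [hlast_idx]
          rcases Nat.lt_or_ge j (L.length - 1) with hlt | hge
          · exact (List.pairwise_iff_getElem.mp h) j (L.length - 1) hj (by omega) hlt
          · have : j = L.length - 1 := by omega
            subst this; exact le_refl _
        simp; omega
      have : L.takeWhile (fun e => e.1 < el.1) = L := List.takeWhile_eq_self_iff.mpr hall
      rw [hlen, hc, this]
    · rw [if_neg hlast]
      rw [hlen]
      exact binsearchLoop_eq L el h (((L.length : Int) - 1) + 1 - 0).toNat 0 ((L.length : Int) - 1)
        (by omega) (by omega) (by omega) (by omega) (by omega)


lemma pvInsertEvent_eq (L : List (Int × Int × String × Int)) (el : Int × Int × String × Int)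
    (h : pvSortedX L) : pvInsertEvent L el = insLeft el L := by
  unfold pvInsertEvent
  rw [binsearch_eq L el h]
  set c := (L.takeWhile (fun e => e.1 < el.1)).length with hc
  have hsplit : L.takeWhile (fun e => decide (e.1 < el.1))
      ++ L.dropWhile (fun e => decide (e.1 < el.1)) = L := List.takeWhile_append_dropWhile
  have hcle : c ≤ L.length := by
    have := congrArg List.length hsplit
    simp only [List.length_append] at this
    omega
  have hlen : (PySem.List.len L : Int) = (L.length : Int) := by simp [PySem.List.len]
  rw [hlen]
  by_cases hfull : ((c : Int)) = ((L.length : Int))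
  · rw [if_pos hfull, insLeft_eq]
    have htw : L.takeWhile (fun e => decide (e.1 < el.1)) = L :=
      (List.takeWhile_prefix _).eq_of_length (by omega)
    have hdw : L.dropWhile (fun e => decide (e.1 < el.1)) = [] := by
      have := congrArg List.length hsplit
      simp only [List.length_append] at this
      have h0 : (L.dropWhile (fun e => decide (e.1 < el.1))).length = 0 := by omega
      exact List.eq_nil_of_length_eq_zero h0
    rw [htw, hdw]
  · rw [if_neg hfull, PySem.List.insert_natCast L c el hcle, insLeft_eq]
    have htw : L.takeWhile (fun e => decide (e.1 < el.1)) = L.take c :=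
      (List.prefix_iff_eq_take).mp (List.takeWhile_prefix _)
    have hdw : L.dropWhile (fun e => decide (e.1 < el.1)) = L.drop c := by
      conv_rhs => rw [← hsplit]
      rw [hc, htw]
      simp [List.drop_left']
    rw [htw, hdw]

lemma foldl_stepA_eq (secs : List ((Int × Int) × (Int × Int))) (s0 : Int)
    (acc : List (Int × Int × String × Int)) (hs : pvSortedX acc)
    (hidx : ∀ e ∈ acc, e.2.2.2 < s0) :
    (PySem.List.enumerate secs s0).foldl (fun ev p => pvStepA ev p.1 p.2) acc
      = ((PySem.List.enumerate secs s0).flatMap pvEvents2).foldl (fun a e => insLeft e a) acc := by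
  induction secs generalizing s0 acc with
  | nil => simp [PySem.List.enumerate]
  | cons x xs ih =>
    rw [PySem.List.enumerate_cons]
    simp only [List.foldl_cons, List.flatMap_cons, List.foldl_append]
    have hstep : pvStepA acc s0 x
        = insLeft (x.2.1, x.2.2, "t", s0) (insLeft (x.1.1, x.1.2, "s", s0) acc) := by
      simp only [pvStepA]
      have hn3 : pvNotInArity3 acc = true := by simp [pvNotInArity3]
      rw [if_pos hn3, pvInsertEvent_eq acc _ hs]
      have hmem : ((insLeft (x.1.1, x.1.2, "s", s0) acc).contains
          ((x.2.1, x.2.2, "t", s0) : Int × Int × String × Int)) = false := by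
        have hnot : ((x.2.1, x.2.2, "t", s0) : Int × Int × String × Int)
            ∉ insLeft (x.1.1, x.1.2, "s", s0) acc := ?_
        · simpa using hnot
        intro hmem'
        rcases List.mem_cons.mp ((insLeft_perm _ acc).mem_iff.mp hmem') with h1 | h2
        · have hts : ("t" : String) = "s" := congrArg (fun e => e.2.2.1) h1
          simp at hts
        · have := hidx _ h2
          simp at this
      rw [hmem]
      simp only [Bool.not_false, if_pos]
      exact pvInsertEvent_eq _ _ (insLeft_sorted _ _ hs)
    rw [hstep]
    have hs2 : pvSortedX (insLeft (x.2.1, x.2.2, "t", s0) (insLeft (x.1.1, x.1.2, "s", s0) acc)) :=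
      insLeft_sorted _ _ (insLeft_sorted _ _ hs)
    have hidx2 : ∀ e ∈ insLeft (x.2.1, x.2.2, "t", s0) (insLeft (x.1.1, x.1.2, "s", s0) acc),
        e.2.2.2 < s0 + 1 := by
      intro e he
      rcases List.mem_cons.mp ((insLeft_perm _ _).mem_iff.mp he) with h1 | h2
      · subst h1; show s0 < s0 + 1; omega
      rcases List.mem_cons.mp ((insLeft_perm _ _).mem_iff.mp h2) with h3 | h4
      · subst h3; show s0 < s0 + 1; omega
      · have := hidx _ h4; omega
    have := ih (s0 + 1) _ hs2 hidx2
    simpa [pvEvents2] using this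

lemma foldl_appendB (L : List (Int × ((Int × Int) × (Int × Int))))
    (init : List (Int × Int × String × Int)) :
    L.foldl (fun events spq =>
      (events ++ [(spq.2.1.1, spq.2.1.2, "s", spq.1)]) ++ [(spq.2.2.1, spq.2.2.2, "t", spq.1)]) init
      = init ++ L.flatMap pvEvents2 := by
  induction L generalizing init with
  | nil => simp
  | cons x xs ih =>
    simp only [List.foldl_cons, List.flatMap_cons, ih]
    simp [pvEvents2]

-- ===== VERDICT (by name: the statement is the Claim_ definition above) =====
theorem event_getter_spec : Claim_equal_event_getter := by
  intro section_ _hdom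
  show event_getter section_ = event_getter_alt section_
  unfold event_getter event_getter_alt
  -- A's range-indexed loop is the fold of its body over the enumerated list
  have hA : (PySem.List.pyRange 0 (PySem.List.len section_) 1).foldl
      (fun events s => pvStepA events s (PySem.List.pyGetD section_ s pvDefSeg)) []
      = (PySem.List.enumerate section_ 0).foldl (fun ev p => pvStepA ev p.1 p.2) [] := by
    rw [PySem.List.enumerate_eq_map_pyRange section_ pvDefSeg, List.foldl_map]
  rw [hA, foldl_stepA_eq section_ 0 [] (by simp [pvSortedX]) (by simp),
    foldl_insLeft_eq_foldr]
  -- B's builder loop collects exactly the same event sequence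
  have hB : (PySem.List.enumerate section_ 0).foldl
      (fun events spq =>
        (events ++ [(spq.2.1.1, spq.2.1.2, "s", spq.1)]) ++ [(spq.2.2.1, spq.2.2.2, "t", spq.1)]) []
      = (PySem.List.enumerate section_ 0).flatMap pvEvents2 := by
    simpa using foldl_appendB (PySem.List.enumerate section_ 0) []
  rw [hB]
  -- Python's stable sort of the reversed sequence is the foldr of insAfter over the sequence
  simp only [PySem.List.sorted, List.foldl_reverse]
  rfl
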